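-- pv_equiv track=rewrite | github.com/sklam/codetrace | codetrace/tests/samples.py | loop4
-- ===== SOURCE A (Python) =====
-- def loop4(a):
--     c = 0
--     for i in range(a):
--         for j in range(a):
--             for k in range(a):
--                 c += (i + 1) * (j + 2) * (k + 3)
--             c += k
--         c += j
--     c += 1
--     return c
-- ===== SOURCE B (Python) =====
-- def loop4(a):
--     # Closed form: sum_{i,j,k in range(a)} (i+1)(j+2)(k+3) factors into three
--     # arithmetic-series products; the leftover 'c += k' (a*a times) and
--     # 'c += j' (a times) contribute with the final loop values j = k = a-1.
--     if a < 1: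
--         return 1
--     return (a * (a + 1) // 2) * (a * (a + 3) // 2) * (a * (a + 5) // 2) \
--         + a * a * (a - 1) + a * (a - 1) + 1
-- ===== Notes on version B (the rewrite author's own statement) =====
-- stated objective: faster
-- what changed: Replaces the triple nested loop (plus leftover loop-variable additions) with an O(1) closed-form product of three arithmetic series plus the a^2*(a-1) and a*(a-1) leftover terms.
import Mathlib
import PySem

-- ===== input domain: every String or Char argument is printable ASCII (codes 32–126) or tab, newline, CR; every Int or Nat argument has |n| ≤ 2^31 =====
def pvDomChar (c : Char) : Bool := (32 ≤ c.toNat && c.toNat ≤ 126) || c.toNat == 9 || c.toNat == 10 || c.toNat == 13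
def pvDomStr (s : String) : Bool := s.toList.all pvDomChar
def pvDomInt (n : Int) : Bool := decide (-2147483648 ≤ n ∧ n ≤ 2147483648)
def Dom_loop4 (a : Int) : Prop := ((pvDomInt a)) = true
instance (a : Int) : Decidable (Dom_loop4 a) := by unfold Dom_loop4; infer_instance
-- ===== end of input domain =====

-- B replaces A's O(a^3) triple loop by an O(1) closed-form formula (objective: faster, asymptotic).

-- ===== PORT A =====
-- state (c, j, k); j and k start at a placeholder 0 that Python leaves unbound,
-- but it is never read before being assigned (reads happen only after a loop ran)
def loop4 (a : Int) : Int :=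
  let r := PySem.List.pyRange 0 a 1
  let s := r.foldl (fun (s : Int × Int × Int) i =>
    let s2 := r.foldl (fun (t : Int × Int × Int) j =>
      let u := r.foldl (fun (w : Int × Int × Int) k =>
        (w.1 + (i + 1) * (j + 2) * (k + 3), w.2.1, k)) (t.1, j, t.2.2)
      (u.1 + u.2.2, u.2.1, u.2.2)) s
    (s2.1 + s2.2.1, s2.2.1, s2.2.2)) (0, 0, 0)
  s.1 + 1

-- ===== PORT B =====
def loop4_alt (a : Int) : Int :=
  if a < 1 then 1
  else PySem.Int.floordiv (a * (a + 1)) 2 * PySem.Int.floordiv (a * (a + 3)) 2 *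
         PySem.Int.floordiv (a * (a + 5)) 2
       + a * a * (a - 1) + a * (a - 1) + 1

-- ===== PRECONDITION & SPEC =====
def Spec_loop4 (a : Int) (out : Int) : Prop := out = loop4_alt a
instance (a : Int) (out : Int) : Decidable (Spec_loop4 a out) := by unfold Spec_loop4; infer_instance

-- ===== CLAIM (what is proved, stated in full; the proofs are below) =====
def Claim_equal_loop4 : Prop := ∀ (a : Int), Dom_loop4 a → Spec_loop4 a (loop4 a)

-- ===== LEMMAS AND PROOFS =====

-- inner k-loop: adds P * Σ(k+3) to c, keeps j, leaves k = last element
theorem pv_inner (l : List Int) (P c j k0 : Int) :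
    l.foldl (fun (w : Int × Int × Int) k => (w.1 + P * (k + 3), w.2.1, k)) (c, j, k0)
      = (c + P * (l.map (fun k => k + 3)).sum, j, l.getLastD k0) := by
  induction l generalizing c k0 with
  | nil => simp
  | cons x xs ih =>
      rw [List.foldl_cons, ih, List.getLastD_cons, List.map_cons, List.sum_cons]
      exact congrArg (fun v : Int => ((v, j, xs.getLastD x) : Int × Int × Int)) (by ring)

-- generic affine fold used for the j-loop shape
theorem pv_fold_mid (l : List Int) (g : Int → Int) (L c j0 k0 : Int) :
    l.foldl (fun (t : Int × Int × Int) j => (t.1 + g j + L, j, L)) (c, j0, k0)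
      = (c + (l.map g).sum + (l.length : Int) * L, l.getLastD j0,
          if l = [] then k0 else L) := by
  induction l generalizing c j0 k0 with
  | nil => simp
  | cons x xs ih =>
      rw [List.foldl_cons, ih, List.getLastD_cons, List.map_cons, List.sum_cons,
        List.length_cons, if_neg (List.cons_ne_nil x xs)]
      have h3 : (if xs = [] then L else L) = L := by split <;> rfl
      rw [h3]
      exact congrArg (fun v : Int => ((v, xs.getLastD x, L) : Int × Int × Int))
        (by push_cast; ring)

-- and for the i-loop shape
theorem pv_fold_out (l : List Int) (g : Int → Int) (L c x y : Int) :
    l.foldl (fun (s : Int × Int × Int) i => (s.1 + g i + L, L, L)) (c, x, y)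
      = (c + (l.map g).sum + (l.length : Int) * L,
          if l = [] then x else L, if l = [] then y else L) := by
  induction l generalizing c x y with
  | nil => simp
  | cons z zs ih =>
      rw [List.foldl_cons, ih, List.map_cons, List.sum_cons, List.length_cons,
        if_neg (List.cons_ne_nil z zs), if_neg (List.cons_ne_nil z zs)]
      have h2 : (if zs = [] then L else L) = L := by split <;> rfl
      rw [h2]
      exact congrArg (fun v : Int => ((v, L, L) : Int × Int × Int)) (by push_cast; ring)

-- arithmetic series over pyRange 0 n 1
theorem pv_sum_shift (m : Int) (n : Nat) :
    2 * ((PySem.List.pyRange 0 (n : Int) 1).map (fun k => k + m)).sum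
      = (n : Int) * ((n : Int) + 2 * m - 1) := by
  induction n with
  | zero => simp
  | succ n ih =>
      have h : PySem.List.pyRange 0 ((n : Int) + 1) 1
          = PySem.List.pyRange 0 (n : Int) 1 ++ [(n : Int)] :=
        PySem.List.pyRange_one_succ_right (by positivity)
      push_cast
      rw [h, List.map_append, List.sum_append]
      simp only [List.map_cons, List.map_nil, List.sum_cons, List.sum_nil]
      linear_combination ih

theorem pv_getLastD (a : Int) (h : 1 ≤ a) (d : Int) :
    (PySem.List.pyRange 0 a 1).getLastD d = a - 1 := by
  have e : PySem.List.pyRange 0 a 1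
      = PySem.List.pyRange 0 (a - 1) 1 ++ [a - 1] := by
    have := PySem.List.pyRange_one_succ_right (a := 0) (b := a - 1) (by omega)
    simpa using this
  rw [e, List.getLastD_concat]

theorem pv_fdiv_double (x : Int) : PySem.Int.floordiv (2 * x) 2 = x := by
  rw [PySem.Int.floordiv_eq_ediv_of_pos (by norm_num)]
  exact Int.mul_ediv_cancel_left x (by norm_num)

theorem pv_sum_const (l : List Int) (c : Int) :
    (l.map (fun _ => c)).sum = (l.length : Int) * c := by
  induction l with
  | nil => simp
  | cons x xs ih => simp only [List.map_cons, List.sum_cons, List.length_cons, ih]; push_cast; ring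

-- ===== VERDICT (by name: the statement is the Claim_ definition above) =====
theorem loop4_spec : Claim_equal_loop4 := by
  intro a _
  unfold Spec_loop4 loop4 loop4_alt
  by_cases h : a < 1
  · simp [PySem.List.pyRange_one_eq_nil (by omega : a ≤ 0), h]
  · replace h : 1 ≤ a := by omega
    simp only [if_neg (by omega : ¬ a < 1)]
    set r := PySem.List.pyRange 0 a 1 with hr
    have hne : r ≠ [] := by
      rw [hr, PySem.List.pyRange_one_cons (by omega : (0:Int) < a)]; simp
    have hL : ∀ d : Int, r.getLastD d = a - 1 := fun d => pv_getLastD a h d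
    have hlen : (r.length : Int) = a := by
      rw [hr, PySem.List.length_pyRange_one]; omega
    set S1 := (r.map (fun k => k + 1)).sum with hS1
    set S2 := (r.map (fun k => k + 2)).sum with hS2
    set S3 := (r.map (fun k => k + 3)).sum with hS3
    obtain ⟨n, hn⟩ : ∃ n : Nat, a = (n : Int) := ⟨a.toNat, by omega⟩
    have e1 : 2 * S1 = a * (a + 1) := by
      rw [hS1, hr, hn]; have := pv_sum_shift 1 n; push_cast at this ⊢; linarith
    have e2 : 2 * S2 = a * (a + 3) := by
      rw [hS2, hr, hn]; have := pv_sum_shift 2 n; push_cast at this ⊢; linarith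
    have e3 : 2 * S3 = a * (a + 5) := by
      rw [hS3, hr, hn]; have := pv_sum_shift 3 n; push_cast at this ⊢; linarith
    have f1 : PySem.Int.floordiv (a * (a + 1)) 2 = S1 := by rw [← e1, pv_fdiv_double]
    have f2 : PySem.Int.floordiv (a * (a + 3)) 2 = S2 := by rw [← e2, pv_fdiv_double]
    have f3 : PySem.Int.floordiv (a * (a + 5)) 2 = S3 := by rw [← e3, pv_fdiv_double]
    rw [f1, f2, f3]
    -- the j-loop (with its inner k-loop) as one closed form
    have hmid : ∀ (c j0 k0 i : Int),
        r.foldl (fun (t : Int × Int × Int) j =>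
          let u := r.foldl (fun (w : Int × Int × Int) k =>
            (w.1 + (i + 1) * (j + 2) * (k + 3), w.2.1, k)) (t.1, j, t.2.2)
          (u.1 + u.2.2, u.2.1, u.2.2)) (c, j0, k0)
        = (c + (r.map (fun j => (i + 1) * (j + 2) * S3)).sum + (r.length : Int) * (a - 1),
            r.getLastD j0, if r = [] then k0 else a - 1) := by
      intro c j0 k0 i
      have hfun : (fun (t : Int × Int × Int) j =>
          let u := r.foldl (fun (w : Int × Int × Int) k =>
            (w.1 + (i + 1) * (j + 2) * (k + 3), w.2.1, k)) (t.1, j, t.2.2)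
          (u.1 + u.2.2, u.2.1, u.2.2))
        = (fun (t : Int × Int × Int) j =>
            (t.1 + (i + 1) * (j + 2) * S3 + (a - 1), j, a - 1)) := by
        funext t j
        simp only [pv_inner, hL, ← hS3]
      rw [hfun, pv_fold_mid]
    simp only [hmid, hL, if_neg hne]
    -- the i-loop as one closed form
    have hout : (fun (s : Int × Int × Int) i =>
        (s.1 + (r.map (fun j => (i + 1) * (j + 2) * S3)).sum + (r.length : Int) * (a - 1) + (a - 1),
          a - 1, a - 1))
      = (fun (s : Int × Int × Int) i =>
        (s.1 + ((i + 1) * S3 * S2 + a * (a - 1)) + (a - 1), a - 1, a - 1)) := by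
      funext s i
      have hin : (r.map (fun j => (i + 1) * (j + 2) * S3)).sum = (i + 1) * S3 * S2 := by
        have h1 : r.map (fun j => (i + 1) * (j + 2) * S3)
            = r.map (fun j => ((i + 1) * S3) * (j + 2)) :=
          List.map_congr_left (fun j _ => by ring)
        rw [h1, List.sum_map_mul_left, ← hS2]
      rw [hin, hlen]
      exact congrArg (fun v : Int => ((v, a - 1, a - 1) : Int × Int × Int)) (by ring)
    rw [hout, pv_fold_out]
    have hsum : (r.map (fun i => (i + 1) * S3 * S2 + a * (a - 1))).sum
        = S1 * S3 * S2 + a * (a * (a - 1)) := by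
      have h1 : r.map (fun i => (i + 1) * S3 * S2 + a * (a - 1))
          = r.map (fun i => ((S3 * S2) * (i + 1)) + (fun _ : Int => a * (a - 1)) i) :=
        List.map_congr_left (fun i _ => by ring)
      rw [h1, List.sum_map_add, List.sum_map_mul_left, pv_sum_const, hlen, ← hS1]; ring
    simp only [hsum, hlen]
    ring
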